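-- pv_equiv track=rewrite | github.com/nguyenvanthi2020/forestry_tool | algorithms/reorder_fields_algorithm.py | _normalize_expr_field_quotes
-- ===== SOURCE A (Python) =====
-- def _normalize_expr_field_quotes(expr_str, src_lc2exact):
--     out, i, s, n = [], 0, expr_str, len(expr_str)
--     while i < n:
--         ch = s[i]
--         if ch == '"':
--             j = i + 1; buf = []
--             while j < n and s[j] != '"': buf.append(s[j]); j += 1
--             name_lc = "".join(buf).lower()
--             exact = src_lc2exact.get(name_lc)
--             out.append(f'"{exact if exact else "".join(buf)}"')
--             i = j + 1
--         else:
--             out.append(ch); i += 1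
--     return "".join(out)
-- ===== SOURCE B (Python) =====
-- def _normalize_expr_field_quotes(expr_str, src_lc2exact):
--     parts = expr_str.split('"')
--     pieces = []
--     for idx, part in enumerate(parts):
--         if idx % 2 == 0:
--             pieces.append(part)
--         else:
--             exact = src_lc2exact.get(part.lower())
--             pieces.append('"%s"' % (exact if exact else part))
--     return "".join(pieces)
-- ===== Notes on version B (the rewrite author's own statement) =====
-- stated objective: idiomatic
-- what changed: Replaces the char-by-char quote-scanning while loop with a single split('"') followed by a parity-driven map over the parts (even parts verbatim, odd parts re-quoted after the case lookup).
import Mathlib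
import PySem

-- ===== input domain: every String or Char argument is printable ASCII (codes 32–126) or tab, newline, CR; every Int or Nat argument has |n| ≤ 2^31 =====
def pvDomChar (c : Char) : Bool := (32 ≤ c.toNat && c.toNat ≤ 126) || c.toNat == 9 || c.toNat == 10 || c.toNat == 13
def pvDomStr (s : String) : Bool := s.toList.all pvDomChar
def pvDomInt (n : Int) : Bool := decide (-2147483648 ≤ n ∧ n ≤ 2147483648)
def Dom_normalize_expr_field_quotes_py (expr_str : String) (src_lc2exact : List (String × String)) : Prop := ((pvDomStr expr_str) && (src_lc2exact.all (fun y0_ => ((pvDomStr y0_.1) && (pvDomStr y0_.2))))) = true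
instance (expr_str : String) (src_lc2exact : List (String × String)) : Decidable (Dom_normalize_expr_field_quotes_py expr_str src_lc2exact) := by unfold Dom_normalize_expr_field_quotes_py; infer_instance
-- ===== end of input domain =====

-- B replaces A's char-by-char quote-scanning loop with one split('"') and a parity map over the parts (idiomatic; same cost).

-- shared by both ports: dict.get on the association list (first match), and the
-- quoted piece '"' + (exact if exact else name) + '"' both Pythons build verbatim
def pvLookup (d : List (String × String)) (k : String) : Option String :=
  (d.find? (fun p => p.1 == k)).map (·.2)

def pvQuoted (src : List (String × String)) (name : List Char) : List Char :=
  let exact := pvLookup src (String.ofList (PySem.Chars.lower name))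
  '"' :: (match exact with
          | some e => if e = "" then name else e.toList
          | none => name) ++ ['"']

-- ===== PORT A =====
-- inner while: collect chars until the next '"' (buf, rest after the closing quote)
def pvA_scan : List Char → List Char × List Char
  | [] => ([], [])
  | c :: rest =>
    if c = '"' then ([], rest)
    else
      let p := pvA_scan rest
      (c :: p.1, p.2)

theorem pvA_scan_len : ∀ cs : List Char, (pvA_scan cs).2.length ≤ cs.length := by
  intro cs
  induction cs with
  | nil => simp [pvA_scan]
  | cons c rest ih =>
    simp only [pvA_scan]
    split
    · simp
    · simpa using Nat.le_succ_of_le ih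

-- outer while over the remaining characters
def pvA_loop (src : List (String × String)) : List Char → List Char
  | [] => []
  | c :: rest =>
    if c = '"' then
      pvQuoted src (pvA_scan rest).1 ++ pvA_loop src (pvA_scan rest).2
    else
      c :: pvA_loop src rest
termination_by cs => cs.length
decreasing_by
  · exact Nat.lt_succ_of_le (pvA_scan_len rest)
  · simp

def normalize_expr_field_quotes_py (expr_str : String) (src_lc2exact : List (String × String)) : String :=
  String.ofList (pvA_loop src_lc2exact expr_str.toList)

-- ===== PORT B =====
def pvB_piece (src : List (String × String)) (p : Int × List Char) : List Char :=
  if PySem.Int.mod p.1 2 = 0 then p.2 else pvQuoted src p.2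

def normalize_expr_field_quotes_py_alt (expr_str : String) (src_lc2exact : List (String × String)) : String :=
  let parts := PySem.Chars.splitOn expr_str.toList ['"']
  String.ofList (PySem.Chars.join [] ((PySem.List.enumerate parts 0).map (pvB_piece src_lc2exact)))

-- ===== PRECONDITION & SPEC =====
def Spec_normalize_expr_field_quotes_py (expr_str : String) (src_lc2exact : List (String × String)) (out : String) : Prop := out = normalize_expr_field_quotes_py_alt expr_str src_lc2exact
instance (expr_str : String) (src_lc2exact : List (String × String)) (out : String) : Decidable (Spec_normalize_expr_field_quotes_py expr_str src_lc2exact out) := by unfold Spec_normalize_expr_field_quotes_py; infer_instance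

-- ===== CLAIM (what is proved, stated in full; the proofs are below) =====
def Claim_equal_normalize_expr_field_quotes_py : Prop := ∀ (expr_str : String) (src_lc2exact : List (String × String)), Dom_normalize_expr_field_quotes_py expr_str src_lc2exact → Spec_normalize_expr_field_quotes_py expr_str src_lc2exact (normalize_expr_field_quotes_py expr_str src_lc2exact)

-- ===== LEMMAS AND PROOFS =====

-- reference splitter: what splitOn on the single-char separator '"' computes
def pvSplit (pre : List Char) : List Char → List (List Char)
  | [] => [pre]
  | c :: rest => if c = '"' then pre :: pvSplit [] rest else pvSplit (pre ++ [c]) rest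

theorem pvSplit_go_spec : ∀ (fuel : Nat) (l cur : List Char) (accs : List (List Char)),
    l.length < fuel →
    PySem.Chars.splitOn.go ['"'] fuel l cur accs = accs.reverse ++ pvSplit cur.reverse l := by
  intro fuel
  induction fuel with
  | zero => intro l cur accs h; omega
  | succ fuel ih =>
    intro l cur accs h
    match l with
    | [] => simp [PySem.Chars.splitOn.go, pvSplit]
    | c :: rest =>
      by_cases hc : c = '"'
      · subst hc
        rw [show PySem.Chars.splitOn.go ['"'] (fuel+1) ('"'::rest) cur accs
              = PySem.Chars.splitOn.go ['"'] fuel rest [] (cur.reverse :: accs) by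
            simp [PySem.Chars.splitOn.go, List.isPrefixOf]]
        rw [ih rest [] (cur.reverse :: accs) (by simpa using Nat.lt_of_succ_lt_succ h)]
        simp [pvSplit]
      · rw [show PySem.Chars.splitOn.go ['"'] (fuel+1) (c::rest) cur accs
              = PySem.Chars.splitOn.go ['"'] fuel rest (c :: cur) accs by
            simp [PySem.Chars.splitOn.go, List.isPrefixOf,
                  show ¬'"' = c from fun h => hc h.symm]]
        rw [ih rest (c :: cur) accs (by simpa using Nat.lt_of_succ_lt_succ h)]
        simp [pvSplit, hc]

theorem pvSplitOn_eq (s : List Char) : PySem.Chars.splitOn s ['"'] = pvSplit [] s := by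
  show PySem.Chars.splitOn.go ['"'] (s.length + 1) s [] [] = pvSplit [] s
  simpa using pvSplit_go_spec (s.length + 1) s [] [] (by omega)

-- moving the accumulated prefix out of pvSplit
theorem pvSplit_pre : ∀ (cs pre : List Char),
    ∃ h t, pvSplit [] cs = h :: t ∧ pvSplit pre cs = (pre ++ h) :: t := by
  intro cs
  induction cs with
  | nil => intro pre; exact ⟨[], [], by simp [pvSplit]⟩
  | cons c rest ih =>
    intro pre
    by_cases hc : c = '"'
    · exact ⟨[], pvSplit [] rest, by simp [pvSplit, hc]⟩
    · obtain ⟨h, t, h1, h2⟩ := ih [c]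
      obtain ⟨h', t', h1', h2'⟩ := ih (pre ++ [c])
      rw [h1] at h1'
      injection h1' with he ht
      exact ⟨[c] ++ h, t, by simp [pvSplit, hc, h2], by
        simp only [pvSplit, if_neg hc, h2']
        simp [he, ht]⟩

-- the two branches of A's inner scan, read off pvSplit
theorem pvScan_split_pos : ∀ rest : List Char, '"' ∈ rest →
    pvSplit [] rest = (pvA_scan rest).1 :: pvSplit [] (pvA_scan rest).2 := by
  intro rest
  induction rest with
  | nil => simp
  | cons c r ih =>
    intro hmem
    by_cases hc : c = '"'
    · simp [pvSplit, pvA_scan, hc]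
    · have hr : '"' ∈ r := by
        rcases List.mem_cons.mp hmem with h | h
        · exact absurd h.symm hc
        · exact h
      obtain ⟨h, t, h1, h2⟩ := pvSplit_pre r [c]
      rw [h1] at ih
      have h3 := ih hr
      injection h3 with he ht
      simp only [pvSplit, if_neg hc, pvA_scan]
      rw [← he, ← ht]
      simpa using h2

theorem pvScan_split_neg : ∀ rest : List Char, '"' ∉ rest →
    pvA_scan rest = (rest, []) ∧ ∀ pre, pvSplit pre rest = [pre ++ rest] := by
  intro rest
  induction rest with
  | nil => simp [pvA_scan, pvSplit]
  | cons c r ih =>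
    intro hmem
    have hc : c ≠ '"' := fun h => hmem (by simp [h])
    have hr : '"' ∉ r := fun h => hmem (List.mem_cons_of_mem _ h)
    obtain ⟨ihs, ihp⟩ := ih hr
    refine ⟨?_, ?_⟩
    · simp [pvA_scan, hc, ihs]
    · intro pre; simp [pvSplit, hc, ihp]

-- B's join-over-parity, written pairwise
def pvJoinAlt (src : List (String × String)) : List (List Char) → List Char
  | [] => []
  | [p] => p
  | p :: q :: ps => p ++ pvQuoted src q ++ pvJoinAlt src ps

theorem pvJoinAlt_cons (src : List (String × String)) (c : Char) (h : List Char)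
    (t : List (List Char)) : pvJoinAlt src ((c :: h) :: t) = c :: pvJoinAlt src (h :: t) := by
  match t with
  | [] => simp [pvJoinAlt]
  | q :: ps => simp [pvJoinAlt]

theorem pvJoin_enum (src : List (String × String)) :
    ∀ (parts : List (List Char)) (k : Nat),
    PySem.Chars.join [] ((PySem.List.enumerate parts ((2 * k : Nat) : Int)).map (pvB_piece src))
      = pvJoinAlt src parts := by
  intro parts
  induction parts using pvJoinAlt.induct with
  | case1 => intro k; simp [PySem.List.enumerate, PySem.Chars.join, List.intercalate, pvJoinAlt]
  | case2 p =>
    intro k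
    simp only [PySem.List.enumerate_cons, PySem.List.enumerate_nil, List.map, pvJoinAlt]
    simp [pvB_piece, PySem.Chars.join_singleton]
  | case3 p q ps ih =>
    intro k
    have h2 : ((2 * k : Nat) : Int) + 1 + 1 = ((2 * (k + 1) : Nat) : Int) := by push_cast; ring
    simp only [PySem.List.enumerate_cons, List.map, pvJoinAlt, h2]
    rw [show pvB_piece src (((2 * k : Nat) : Int), p) = p by
          simp [pvB_piece],
        show pvB_piece src (((2 * k : Nat) : Int) + 1, q) = pvQuoted src q by
          simp [pvB_piece]]
    match ps with
    | [] =>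
      simp only [PySem.List.enumerate_nil, List.map]
      simp [PySem.Chars.join_cons_cons, PySem.Chars.join_singleton, pvJoinAlt]
    | r :: ps' =>
      have := ih (k + 1)
      simp only [PySem.List.enumerate_cons, List.map] at this ⊢
      simp only [PySem.Chars.join_cons_cons, List.append_nil] at this ⊢
      rw [this, List.append_assoc]

theorem pvA_loop_eq_joinAlt (src : List (String × String)) :
    ∀ cs : List Char, pvA_loop src cs = pvJoinAlt src (pvSplit [] cs) := by
  intro cs
  induction cs using pvA_loop.induct with
  | case1 => simp [pvA_loop, pvSplit, pvJoinAlt]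
  | case2 rest ih =>
    rw [pvA_loop, if_pos rfl]
    have hsp : pvSplit [] ('"' :: rest) = [] :: pvSplit [] rest := by simp [pvSplit]
    by_cases hq : '"' ∈ rest
    · rw [hsp, pvScan_split_pos rest hq, ih]
      simp [pvJoinAlt]
    · obtain ⟨hs, hp⟩ := pvScan_split_neg rest hq
      rw [hsp, hs, hp []]
      simp [pvJoinAlt, pvA_loop]
  | case3 c rest hc ih =>
    rw [pvA_loop]
    simp only [if_neg hc]
    obtain ⟨h, t, h1, h2⟩ := pvSplit_pre rest [c]
    simp only [pvSplit, if_neg hc, List.nil_append, h2]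
    rw [ih, h1, ← pvJoinAlt_cons]
    simp

-- ===== VERDICT (by name: the statement is the Claim_ definition above) =====
theorem normalize_expr_field_quotes_py_spec : Claim_equal_normalize_expr_field_quotes_py := by
  intro expr_str src _
  show normalize_expr_field_quotes_py expr_str src = normalize_expr_field_quotes_py_alt expr_str src
  simp only [normalize_expr_field_quotes_py, normalize_expr_field_quotes_py_alt, pvSplitOn_eq]
  rw [show (0 : Int) = ((2 * 0 : Nat) : Int) from rfl, pvJoin_enum, pvA_loop_eq_joinAlt]
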